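-- pv_equiv track=rewrite | github.com/CMSC122GroupProject/CMSC122_Group_Project | backup/asterisk_site/restaurants/ken_algo.py | query_relations
-- ===== SOURCE A (Python) =====
-- dict_api = {'yelp' : ['name_id', 'price', 'rating', 'comments'], 'time' : ['m_open', 'm_closed', 't_open', 't_closed', 'w_open', 'w_closed', 'r_open', 'r_closed', 'f_open',
--             'f_closed', 'sat_open', 'sat_closed', 'sun_open', 'sun_closed', 'name_id'], 'maps' : ['lon', 'lat', 'name_id']}
--
-- tables = ['yelp', 'time', 'maps']
--
-- def query_relations(sample):
--     relation_list = []
--     relations = list(dict_api.keys())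
--     samples = list(sample.keys())
--     for param in samples:
--         for table in tables:
--             if param in dict_api[table] and table in relation_list:
--                 break
--             elif param in dict_api[table] and table not in relation_list:
--                 relation_list.append(table)
--     return  relation_list
-- ===== SOURCE B (Python) =====
-- dict_api = {'yelp' : ['name_id', 'price', 'rating', 'comments'], 'time' : ['m_open', 'm_closed', 't_open', 't_closed', 'w_open', 'w_closed', 'r_open', 'r_closed', 'f_open',
--             'f_closed', 'sat_open', 'sat_closed', 'sun_open', 'sun_closed', 'name_id'], 'maps' : ['lon', 'lat', 'name_id']}
--
-- tables = ['yelp', 'time', 'maps']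
--
-- # Inverted index, built once: param -> ordered list of tables whose column list contains it.
-- param_to_tables = {}
-- for _t in tables:
--     for _p in dict_api[_t]:
--         param_to_tables[_p] = param_to_tables.get(_p, []) + [_t]
--
-- def query_relations(sample):
--     relation_list = []
--     for param in sample:
--         new = []
--         for table in param_to_tables.get(param, []):
--             if table in relation_list:
--                 break
--             new.append(table)
--         relation_list += new
--     return relation_list
-- ===== Notes on version B (the rewrite author's own statement) =====
-- stated objective: faster
-- what changed: B builds an inverted index (param -> ordered list of containing tables) once at module level, then for each sample key takes the prefix of that param's table list not yet recorded and extends the result, instead of A's rescan of every table's column list per key with break/append interleaved.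
import Mathlib
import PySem

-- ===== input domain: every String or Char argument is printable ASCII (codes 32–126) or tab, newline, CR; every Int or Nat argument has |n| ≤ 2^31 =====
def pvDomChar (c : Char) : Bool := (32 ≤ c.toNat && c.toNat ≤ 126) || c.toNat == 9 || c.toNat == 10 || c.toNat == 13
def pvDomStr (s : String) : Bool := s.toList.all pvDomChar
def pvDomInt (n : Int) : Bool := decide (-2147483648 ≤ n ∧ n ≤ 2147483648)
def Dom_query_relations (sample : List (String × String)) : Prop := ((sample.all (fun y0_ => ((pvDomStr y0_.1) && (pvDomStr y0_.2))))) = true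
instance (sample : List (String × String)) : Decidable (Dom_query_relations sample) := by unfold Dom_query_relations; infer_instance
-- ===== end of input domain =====

-- B replaces A's per-key scan over every table's column list by an inverted index
-- (param → tables) built once at module level, plus a prefix-take of the not-yet-recorded
-- tables per sample key (alternative decomposition, same result).

-- ===== PORT A =====
-- module-level dict_api and tables
def pvDictApi : PySem.Dict String (List String) := PySem.Dict.ofList
  [("yelp", ["name_id", "price", "rating", "comments"]),
   ("time", ["m_open", "m_closed", "t_open", "t_closed", "w_open", "w_closed", "r_open", "r_closed", "f_open",
             "f_closed", "sat_open", "sat_closed", "sun_open", "sun_closed", "name_id"]),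
   ("maps", ["lon", "lat", "name_id"])]

def pvTables : List String := ["yelp", "time", "maps"]

-- A's inner 'for table in tables' loop with its break; dict_api[table] never raises
-- (every table is a key of dict_api), so the lookup is ported as getD with default [].
def pvInnerA (param : String) (rl : List String) : List String → List String
  | [] => rl
  | t :: rest =>
    if param ∈ pvDictApi.getD t [] ∧ t ∈ rl then rl
    else if param ∈ pvDictApi.getD t [] ∧ t ∉ rl then pvInnerA param (rl ++ [t]) rest
    else pvInnerA param rl rest

def query_relations (sample : List (String × String)) : List String :=
  let relation_list : List String := []
  let _relations := pvDictApi.keys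
  -- list(sample.keys()): the dict's keys in insertion order (first occurrences)
  let samples := PySem.List.dedup (sample.map Prod.fst)
  samples.foldl (fun rl param => pvInnerA param rl pvTables) relation_list

-- ===== PORT B =====
-- module-level inverted index: param -> ordered list of tables whose column list contains it
def pvIndex : PySem.Dict String (List String) :=
  pvTables.foldl (fun d t =>
    (pvDictApi.getD t []).foldl (fun d p => d.insert p (d.getD p [] ++ [t])) d)
    PySem.Dict.empty

-- B's inner loop building 'new': the prefix of the candidates not yet in relation_list
def pvTakeNew (rl : List String) : List String → List String
  | [] => []
  | t :: rest => if t ∈ rl then [] else t :: pvTakeNew rl rest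

def query_relations_alt (sample : List (String × String)) : List String :=
  (PySem.List.dedup (sample.map Prod.fst)).foldl
    (fun rl param => rl ++ pvTakeNew rl (pvIndex.getD param [])) []

-- ===== PRECONDITION & SPEC =====
def Spec_query_relations (sample : List (String × String)) (out : List String) : Prop := out = query_relations_alt sample
instance (sample : List (String × String)) (out : List String) : Decidable (Spec_query_relations sample out) := by unfold Spec_query_relations; infer_instance

-- ===== CLAIM (what is proved, stated in full; the proofs are below) =====
def Claim_equal_query_relations : Prop := ∀ (sample : List (String × String)), Dom_query_relations sample → Spec_query_relations sample (query_relations sample)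

-- ===== LEMMAS AND PROOFS =====

-- the index evaluated: its entries as a literal association list
theorem pvIndex_eq : pvIndex = PySem.Dict.mk
    [("name_id", ["yelp", "time", "maps"]), ("price", ["yelp"]), ("rating", ["yelp"]), ("comments", ["yelp"]),
     ("m_open", ["time"]), ("m_closed", ["time"]), ("t_open", ["time"]), ("t_closed", ["time"]),
     ("w_open", ["time"]), ("w_closed", ["time"]), ("r_open", ["time"]), ("r_closed", ["time"]),
     ("f_open", ["time"]), ("f_closed", ["time"]), ("sat_open", ["time"]), ("sat_closed", ["time"]),
     ("sun_open", ["time"]), ("sun_closed", ["time"]), ("lon", ["maps"]), ("lat", ["maps"])] := by decide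

theorem pv_api_yelp : pvDictApi.getD "yelp" [] = ["name_id", "price", "rating", "comments"] := by decide
theorem pv_api_time : pvDictApi.getD "time" [] =
    ["m_open", "m_closed", "t_open", "t_closed", "w_open", "w_closed", "r_open", "r_closed",
     "f_open", "f_closed", "sat_open", "sat_closed", "sun_open", "sun_closed", "name_id"] := by decide
theorem pv_api_maps : pvDictApi.getD "maps" [] = ["lon", "lat", "name_id"] := by decide

-- every param occurring in any table's column list
def pvAllParams : List String :=
  ["name_id", "price", "rating", "comments", "m_open", "m_closed", "t_open", "t_closed",
   "w_open", "w_closed", "r_open", "r_closed", "f_open", "f_closed", "sat_open", "sat_closed",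
   "sun_open", "sun_closed", "lon", "lat"]

-- the per-key step of A equals the per-key step of B, for every param and accumulator
theorem pv_key (param : String) (rl : List String) :
    pvInnerA param rl pvTables = rl ++ pvTakeNew rl (pvIndex.getD param []) := by
  by_cases h : param ∈ pvAllParams
  · fin_cases h <;>
      · simp only [pvIndex_eq, PySem.Dict.getD_eq_get?_getD, PySem.Dict.get?_mk_cons]
        simp [pvInnerA, pvTables, pvTakeNew, pv_api_yelp, pv_api_time, pv_api_maps]
        split_ifs <;> simp_all
  · simp only [pvAllParams, List.mem_cons, List.not_mem_nil, or_false] at h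
    push_neg at h
    obtain ⟨h1,h2,h3,h4,h5,h6,h7,h8,h9,h10,h11,h12,h13,h14,h15,h16,h17,h18,h19,h20⟩ := h
    simp only [pvIndex_eq, PySem.Dict.getD_eq_get?_getD, PySem.Dict.get?_mk_cons]
    simp [pvInnerA, pvTables, pvTakeNew, PySem.Dict.get?, pv_api_yelp, pv_api_time, pv_api_maps,
          h1,h2,h3,h4,h5,h6,h7,h8,h9,h10,h11,h12,h13,h14,h15,h16,h17,h18,h19,h20,
          Ne.symm h1, Ne.symm h2, Ne.symm h3, Ne.symm h4, Ne.symm h5, Ne.symm h6, Ne.symm h7,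
          Ne.symm h8, Ne.symm h9, Ne.symm h10, Ne.symm h11, Ne.symm h12, Ne.symm h13, Ne.symm h14,
          Ne.symm h15, Ne.symm h16, Ne.symm h17, Ne.symm h18, Ne.symm h19, Ne.symm h20]

-- ===== VERDICT (by name: the statement is the Claim_ definition above) =====
theorem query_relations_spec : Claim_equal_query_relations := by
  intro sample _
  unfold Spec_query_relations query_relations query_relations_alt
  apply PySem.List.foldl_congr_mem
  intro acc x _
  exact pv_key x acc
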